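-- pv_equiv track=rewrite | github.com/Ludka97/lessons | lesson_07/solution_02.py | city_to_country
-- ===== SOURCE A (Python) =====
-- def city_to_country(city):
--     mapping = {
--         "Belarus" : ["Minsk", "Grodno", "Ivye"],
--         "Poland" : ["Poznan", "Belostok", "Wroclaw"],
--         "Japan" : ["Tokyo", "Tsushima", "Toyota"],
--     }
--     for country, city_list in mapping.items():
--         if city in city_list:
--             return country
-- ===== SOURCE B (Python) =====
-- def city_to_country(city):
--     mapping = {
--         "Belarus": ["Minsk", "Grodno", "Ivye"],
--         "Poland": ["Poznan", "Belostok", "Wroclaw"],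
--         "Japan": ["Tokyo", "Tsushima", "Toyota"],
--     }
--     reverse = {c: country for country, cities in mapping.items() for c in cities}
--     return reverse.get(city)
-- ===== Notes on version B (the rewrite author's own statement) =====
-- stated objective: alternative
-- what changed: Replaces the per-country loop with list-membership tests by building a reverse city->country index once and doing a single dict lookup.
import Mathlib
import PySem

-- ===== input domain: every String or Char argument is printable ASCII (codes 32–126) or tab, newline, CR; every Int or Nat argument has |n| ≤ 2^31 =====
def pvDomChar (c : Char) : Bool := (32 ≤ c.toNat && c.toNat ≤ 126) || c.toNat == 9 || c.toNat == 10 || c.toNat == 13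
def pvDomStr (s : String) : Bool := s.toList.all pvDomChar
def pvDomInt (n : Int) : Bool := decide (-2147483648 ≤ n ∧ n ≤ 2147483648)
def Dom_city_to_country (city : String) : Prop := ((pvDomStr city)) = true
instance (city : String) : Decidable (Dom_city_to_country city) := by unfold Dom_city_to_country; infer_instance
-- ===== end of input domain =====

-- B replaces A's per-country loop with membership tests by a reverse city→country index built once, then one lookup (alternative decomposition, same result).

-- ===== PORT A =====
-- the hard-coded mapping, in dict insertion order
def pvMapping : List (String × List String) :=
  [("Belarus", ["Minsk", "Grodno", "Ivye"]),
   ("Poland", ["Poznan", "Belostok", "Wroclaw"]),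
   ("Japan", ["Tokyo", "Tsushima", "Toyota"])]

-- A's for-loop with early return: first country whose city list contains the city
def pvLoopA (city : String) : List (String × List String) → Option String
  | [] => none
  | (country, cityList) :: rest =>
      if cityList.contains city then some country else pvLoopA city rest

def city_to_country (city : String) : Option String :=
  pvLoopA city pvMapping

-- ===== PORT B =====
-- B's reverse dict comprehension over the same mapping
def pvReverse : PySem.Dict String String :=
  pvMapping.foldl (fun d p => p.2.foldl (fun d c => d.insert c p.1) d) PySem.Dict.empty

def city_to_country_alt (city : String) : Option String :=
  pvReverse.get? city

-- ===== PRECONDITION & SPEC =====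
def Spec_city_to_country (city : String) (out : Option String) : Prop := out = city_to_country_alt city
instance (city : String) (out : Option String) : Decidable (Spec_city_to_country city out) := by unfold Spec_city_to_country; infer_instance

-- ===== CLAIM (what is proved, stated in full; the proofs are below) =====
def Claim_equal_city_to_country : Prop := ∀ (city : String), Dom_city_to_country city → Spec_city_to_country city (city_to_country city)

-- ===== LEMMAS AND PROOFS =====

-- ===== VERDICT (by name: the statement is the Claim_ definition above) =====
theorem city_to_country_spec : Claim_equal_city_to_country := by
  intro city _
  show pvLoopA city pvMapping = pvReverse.get? city
  by_cases h1 : city = "Minsk"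
  · subst h1; decide
  by_cases h2 : city = "Grodno"
  · subst h2; decide
  by_cases h3 : city = "Ivye"
  · subst h3; decide
  by_cases h4 : city = "Poznan"
  · subst h4; decide
  by_cases h5 : city = "Belostok"
  · subst h5; decide
  by_cases h6 : city = "Wroclaw"
  · subst h6; decide
  by_cases h7 : city = "Tokyo"
  · subst h7; decide
  by_cases h8 : city = "Tsushima"
  · subst h8; decide
  by_cases h9 : city = "Toyota"
  · subst h9; decide
  have hrev : pvReverse = PySem.Dict.mk
      [("Minsk", "Belarus"), ("Grodno", "Belarus"), ("Ivye", "Belarus"),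
       ("Poznan", "Poland"), ("Belostok", "Poland"), ("Wroclaw", "Poland"),
       ("Tokyo", "Japan"), ("Tsushima", "Japan"), ("Toyota", "Japan")] := by decide
  rw [hrev]
  simp [pvLoopA, pvMapping, PySem.Dict.get?,
    Ne.symm h1, Ne.symm h2, Ne.symm h3, Ne.symm h4, Ne.symm h5, Ne.symm h6,
    Ne.symm h7, Ne.symm h8, Ne.symm h9, h1, h2, h3, h4, h5, h6, h7, h8, h9]
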